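-- pv_equiv track=rewrite | github.com/phuoctam3009/RAG-Chatbot | function_calling.py | search_employee_directory
-- ===== SOURCE A (Python) =====
-- from typing import Dict, List, Optional
--
-- def search_employee_directory(name: str = None, department: str = None, email: str = None) -> List[Dict]:
--     """
--     Search the employee directory
--
--     Args:
--         name: Employee name to search
--         department: Department to filter by
--         email: Email address to search
--
--     Returns:
--         List of matching employee records
--     """
--     # Mock employee directory
--     employees = [
--         {"name": "John Smith", "email": "john.smith@company.com", "department": "IT Support",
--          "phone": "ext. 4357", "location": "Building A, Floor 3"},
--         {"name": "Sarah Johnson", "email": "sarah.johnson@company.com", "department": "IT Security",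
--          "phone": "ext. 4358", "location": "Building A, Floor 3"},
--         {"name": "Mike Chen", "email": "mike.chen@company.com", "department": "Network Admin",
--          "phone": "ext. 4359", "location": "Building A, Floor 3"},
--         {"name": "Emily Davis", "email": "emily.davis@company.com", "department": "IT Manager",
--          "phone": "ext. 4350", "location": "Building A, Floor 3"},
--     ]
--
--     results = employees
--
--     if name:
--         results = [e for e in results if name.lower() in e["name"].lower()]
--     if department:
--         results = [e for e in results if department.lower() in e["department"].lower()]
--     if email:
--         results = [e for e in results if email.lower() in e["email"].lower()]
--
--     return results
-- ===== SOURCE B (Python) =====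
-- from typing import Dict, List, Optional
--
-- def search_employee_directory(name: str = None, department: str = None, email: str = None) -> List[Dict]:
--     """Index-set algorithm: each active filter is turned into a bitmask of the
--     employee indices it matches; the masks are intersected with bitwise AND and
--     the result is read off by index, so no intermediate record lists are built."""
--     employees = [
--         {"name": "John Smith", "email": "john.smith@company.com", "department": "IT Support",
--          "phone": "ext. 4357", "location": "Building A, Floor 3"},
--         {"name": "Sarah Johnson", "email": "sarah.johnson@company.com", "department": "IT Security",
--          "phone": "ext. 4358", "location": "Building A, Floor 3"},
--         {"name": "Mike Chen", "email": "mike.chen@company.com", "department": "Network Admin",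
--          "phone": "ext. 4359", "location": "Building A, Floor 3"},
--         {"name": "Emily Davis", "email": "emily.davis@company.com", "department": "IT Manager",
--          "phone": "ext. 4350", "location": "Building A, Floor 3"},
--     ]
--     n = len(employees)
--
--     def mask_of(field, q):
--         q = q.lower()
--         m = 0
--         for i in range(n):
--             if q in employees[i][field].lower():
--                 m |= 1 << i
--         return m
--
--     mask = (1 << n) - 1
--     if name:
--         mask &= mask_of("name", name)
--     if department:
--         mask &= mask_of("department", department)
--     if email:
--         mask &= mask_of("email", email)
--     return [employees[i] for i in range(n) if mask >> i & 1]
-- ===== Notes on version B (the rewrite author's own statement) =====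
-- stated objective: alternative
-- what changed: B replaces A's three sequential list-filter passes by an index-set algorithm: each active filter becomes a bitmask of matching employee indices, the masks are intersected with bitwise AND, and the output is read off by index.
import Mathlib
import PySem

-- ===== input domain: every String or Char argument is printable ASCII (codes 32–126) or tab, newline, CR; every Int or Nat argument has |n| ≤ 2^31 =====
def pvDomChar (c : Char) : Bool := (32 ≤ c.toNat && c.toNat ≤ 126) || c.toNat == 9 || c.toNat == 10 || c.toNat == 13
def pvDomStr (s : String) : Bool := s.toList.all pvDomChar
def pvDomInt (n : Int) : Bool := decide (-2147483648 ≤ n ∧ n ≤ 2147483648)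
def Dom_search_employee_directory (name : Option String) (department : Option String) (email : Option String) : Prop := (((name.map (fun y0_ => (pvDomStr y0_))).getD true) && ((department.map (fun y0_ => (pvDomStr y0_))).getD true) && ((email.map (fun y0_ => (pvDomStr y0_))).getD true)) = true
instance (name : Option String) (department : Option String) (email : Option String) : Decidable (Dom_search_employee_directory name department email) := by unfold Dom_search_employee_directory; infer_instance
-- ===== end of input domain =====

-- B replaces A's three sequential list-filter passes by an index-set algorithm:
-- each active filter becomes a bitmask of matching employee indices, the masks are
-- intersected with bitwise AND, and the output is read off by index (objective: alternative).

-- the mock employee directory literal both Pythons embed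
def pvEmployees : List (List (String × String)) :=
  [ [("name", "John Smith"), ("email", "john.smith@company.com"), ("department", "IT Support"),
     ("phone", "ext. 4357"), ("location", "Building A, Floor 3")],
    [("name", "Sarah Johnson"), ("email", "sarah.johnson@company.com"), ("department", "IT Security"),
     ("phone", "ext. 4358"), ("location", "Building A, Floor 3")],
    [("name", "Mike Chen"), ("email", "mike.chen@company.com"), ("department", "Network Admin"),
     ("phone", "ext. 4359"), ("location", "Building A, Floor 3")],
    [("name", "Emily Davis"), ("email", "emily.davis@company.com"), ("department", "IT Manager"),
     ("phone", "ext. 4350"), ("location", "Building A, Floor 3")] ]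

-- shared atom: 'q.lower() in e[field].lower()'; the looked-up key is always present
-- in the literal rows, so Dict.getD with default "" is exact
def pvMatch (field q : String) (e : List (String × String)) : Bool :=
  PySem.Str.isIn (PySem.Str.lower q) (PySem.Str.lower (PySem.Dict.getD ⟨e⟩ field ""))

-- ===== PORT A =====
def search_employee_directory (name : Option String) (department : Option String) (email : Option String) : List (List (String × String)) :=
  let results := pvEmployees
  let results := match name with
    | none => results
    | some s => if s = "" then results else results.filter (fun e => pvMatch "name" s e)
  let results := match department with
    | none => results
    | some s => if s = "" then results else results.filter (fun e => pvMatch "department" s e)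
  let results := match email with
    | none => results
    | some s => if s = "" then results else results.filter (fun e => pvMatch "email" s e)
  results

-- ===== PORT B =====
-- 'for i in range(n)' indices are 0..n-1, represented as Nat (exact: Python's are nonnegative)
def pvMaskOf (field q : String) : Nat :=
  (List.range pvEmployees.length).foldl
    (fun m i => if pvMatch field q (pvEmployees.getD i []) then m ||| (1 <<< i) else m) 0

def search_employee_directory_alt (name : Option String) (department : Option String) (email : Option String) : List (List (String × String)) :=
  let mask := (1 <<< pvEmployees.length) - 1
  let mask := match name with
    | none => mask
    | some s => if s = "" then mask else mask &&& pvMaskOf "name" s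
  let mask := match department with
    | none => mask
    | some s => if s = "" then mask else mask &&& pvMaskOf "department" s
  let mask := match email with
    | none => mask
    | some s => if s = "" then mask else mask &&& pvMaskOf "email" s
  (List.range pvEmployees.length).filterMap
    (fun i => if (mask >>> i) &&& 1 = 1 then some (pvEmployees.getD i []) else none)

-- ===== PRECONDITION & SPEC =====
def Spec_search_employee_directory (name : Option String) (department : Option String) (email : Option String) (out : List (List (String × String))) : Prop := out = search_employee_directory_alt name department email
instance (name : Option String) (department : Option String) (email : Option String) (out : List (List (String × String))) : Decidable (Spec_search_employee_directory name department email out) := by unfold Spec_search_employee_directory; infer_instance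

-- ===== CLAIM (what is proved, stated in full; the proofs are below) =====
def Claim_equal_search_employee_directory : Prop := ∀ (name : Option String) (department : Option String) (email : Option String), Dom_search_employee_directory name department email → Spec_search_employee_directory name department email (search_employee_directory name department email)

-- ===== LEMMAS AND PROOFS =====

-- selection of pvEmployees by a mask
def pvSel (m : Nat) : List (List (String × String)) :=
  (List.range pvEmployees.length).filterMap
    (fun i => if (m >>> i) &&& 1 = 1 then some (pvEmployees.getD i []) else none)

theorem pvMS1 (m : Nat) : (m % 2) >>> 1 = 0 := by
  rw [Nat.shiftRight_eq_div_pow]; omega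

theorem pvMS2 (m : Nat) : (m % 2) >>> 2 = 0 := by
  rw [Nat.shiftRight_eq_div_pow]; omega

theorem pvMS3 (m : Nat) : (m % 2) >>> 3 = 0 := by
  rw [Nat.shiftRight_eq_div_pow]; omega

theorem pvBit (x i : Nat) : (x >>> i % 2 = 1) ↔ x.testBit i := by
  simp [Nat.testBit]

theorem pvAndBit (m c i : Nat) : ((m &&& c) >>> i % 2 = 1) ↔ ((m >>> i % 2 = 1) ∧ (c >>> i % 2 = 1)) := by
  rw [pvBit, pvBit, pvBit, Nat.testBit_and]; simp

-- AND-ing the filter's mask = filtering the selected records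
set_option maxHeartbeats 3200000 in
theorem pvMask_lemma (m : Nat) (field q : String) :
    pvSel (m &&& pvMaskOf field q) = (pvSel m).filter (pvMatch field q) := by
  have hr : List.range pvEmployees.length = [0, 1, 2, 3] := rfl
  cases hb0 : pvMatch field q (pvEmployees[0]?.getD []) <;>
  cases hb1 : pvMatch field q (pvEmployees[1]?.getD []) <;>
  cases hb2 : pvMatch field q (pvEmployees[2]?.getD []) <;>
  cases hb3 : pvMatch field q (pvEmployees[3]?.getD []) <;>
  simp only [pvSel, pvMaskOf, hr, List.foldl_cons, List.foldl_nil, List.getD_eq_getElem?_getD,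
    hb0, hb1, hb2, hb3, if_true, List.filterMap_cons, List.filterMap_nil] <;>
  by_cases t0 : m % 2 = 1 <;> by_cases t1 : m >>> 1 % 2 = 1 <;>
  by_cases t2 : m >>> 2 % 2 = 1 <;> by_cases t3 : m >>> 3 % 2 = 1 <;>
  simp [pvAndBit, pvMS1, pvMS2, pvMS3, t0, t1, t2, t3, hb0, hb1, hb2, hb3]

theorem pvSel_full : pvSel ((1 <<< pvEmployees.length) - 1) = pvEmployees := by
  decide

-- ===== VERDICT (by name: the statement is the Claim_ definition above) =====
theorem search_employee_directory_spec : Claim_equal_search_employee_directory := by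
  intro name department email _
  unfold Spec_search_employee_directory search_employee_directory search_employee_directory_alt
  rcases name with _ | n <;> rcases department with _ | d <;> rcases email with _ | e <;>
    simp only [] <;> (try split_ifs) <;>
    simp only [show ∀ m, (List.range pvEmployees.length).filterMap
        (fun i => if (m >>> i) &&& 1 = 1 then some (pvEmployees.getD i []) else none) = pvSel m
      from fun _ => rfl, pvMask_lemma, pvSel_full]
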